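-- pv_equiv track=rewrite | github.com/shevdan/Algo-DataStructures-sem8 | sem9/task5.py | max_plan
-- ===== SOURCE A (Python) =====
-- def max_plan(a, b, time):
--     # if given time is less then the list of comments at
--     # given minute, return none
--     if time >= len(a) or time >= len(b):
--         return None
--     # if time is none, return just maximum value
--     if time == 1:
--         return max(a[0], b[0])
--     # get maximum from previous time and current one
--     # for each machine
--     max_a = max(max_plan(a, b, time - 1) + a[time], max_plan(b, a, time - 1))
--     max_b = max(max_plan(b, a, time - 1) + b[time], max_plan(a, b, time - 1))
--     # return the largest value
--     return max(max_a, max_b)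
-- ===== SOURCE B (Python) =====
-- def max_plan(a, b, time):
--     # Same guard as the task: not enough data for the requested time.
--     if time >= len(a) or time >= len(b):
--         return None
--     # The recursive value is symmetric in (a, b) and satisfies
--     # f(t) = f(t-1) + max(a[t], b[t], 0), f(1) = max(a[0], b[0]),
--     # so a single linear accumulation replaces the exponential recursion.
--     total = max(a[0], b[0])
--     for i in range(2, time + 1):
--         total += max(a[i], b[i], 0)
--     return total
-- ===== Notes on version B (the rewrite author's own statement) =====
-- stated objective: faster
-- what changed: Replaced the exponential four-way recursion by a single left-to-right accumulation using the closed-form step f(t) = f(t-1) + max(a[t], b[t], 0), f(1) = max(a[0], b[0]), valid because the recursive value is symmetric in (a, b).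
import Mathlib
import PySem

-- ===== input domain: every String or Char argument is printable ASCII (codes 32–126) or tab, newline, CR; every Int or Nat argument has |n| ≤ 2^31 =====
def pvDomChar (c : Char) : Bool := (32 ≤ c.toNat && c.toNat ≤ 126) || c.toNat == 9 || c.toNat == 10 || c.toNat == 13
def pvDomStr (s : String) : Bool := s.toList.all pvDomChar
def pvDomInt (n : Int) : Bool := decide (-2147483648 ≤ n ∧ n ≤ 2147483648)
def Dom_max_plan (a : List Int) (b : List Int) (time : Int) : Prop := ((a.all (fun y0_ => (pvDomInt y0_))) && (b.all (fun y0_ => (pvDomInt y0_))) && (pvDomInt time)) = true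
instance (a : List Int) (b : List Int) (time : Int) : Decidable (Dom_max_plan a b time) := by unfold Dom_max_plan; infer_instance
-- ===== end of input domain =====

-- B replaces A's exponential four-way recursion over time by a single linear accumulation
-- (objective: faster, asymptotically). Equivalence is about the return value on Pre_.

-- ===== PORT A =====
-- Literal transliteration of A's recursion; the Nat fuel only makes the recursion total:
-- where the fuel guard fires the Python recursion never returns (those inputs are outside Pre_).
def maxPlanGo (a : List Int) (b : List Int) (time : Int) : Nat → Option Int
  | 0 => none
  | fuel + 1 =>
    if (a.length : Int) ≤ time ∨ (b.length : Int) ≤ time then none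
    else if time = 1 then
      match PySem.List.pyGet? a 0, PySem.List.pyGet? b 0 with
      | some x, some y => some (max x y)
      | _, _ => none
    else
      match maxPlanGo a b (time - 1) fuel, maxPlanGo b a (time - 1) fuel,
            PySem.List.pyGet? a time, PySem.List.pyGet? b time with
      | some pab, some pba, some xt, some yt =>
          -- max_a = max(f(a,b,t-1)+a[t], f(b,a,t-1)); max_b = max(f(b,a,t-1)+b[t], f(a,b,t-1))
          some (max (max (pab + xt) pba) (max (pba + yt) pab))
      | _, _, _, _ => none

def max_plan (a : List Int) (b : List Int) (time : Int) : Option Int :=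
  maxPlanGo a b time time.toNat

-- ===== PORT B =====
def max_plan_alt (a : List Int) (b : List Int) (time : Int) : Option Int :=
  if (a.length : Int) ≤ time ∨ (b.length : Int) ≤ time then none
  else
    match PySem.List.pyGet? a 0, PySem.List.pyGet? b 0 with
    | some x, some y =>
        some ((PySem.List.pyRange 2 (time + 1) 1).foldl
          (fun acc i =>
            acc + max (max (PySem.List.pyGetD a i 0) (PySem.List.pyGetD b i 0)) 0)
          (max x y))
    | _, _ => none

-- ===== PRECONDITION & SPEC =====
-- Pre_ excludes exactly the inputs (time ≤ 0 while time < len a and time < len b) on which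
-- A's recursion never reaches its base case and raises RecursionError.
def Pre_max_plan (a : List Int) (b : List Int) (time : Int) : Prop :=
  1 ≤ time ∨ (a.length : Int) ≤ time ∨ (b.length : Int) ≤ time
instance (a : List Int) (b : List Int) (time : Int) : Decidable (Pre_max_plan a b time) := by
  unfold Pre_max_plan; infer_instance

def pvWitness_max_plan : List Int × List Int × Int := ([3, 1, 2], [2, 5, -1], 2)

def Spec_max_plan (a : List Int) (b : List Int) (time : Int) (out : Option Int) : Prop :=
  out = max_plan_alt a b time
instance (a : List Int) (b : List Int) (time : Int) (out : Option Int) :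
    Decidable (Spec_max_plan a b time out) := by unfold Spec_max_plan; infer_instance

-- ===== CLAIM (what is proved, stated in full; the proofs are below) =====
def Claim_equal_max_plan : Prop := ∀ (a : List Int) (b : List Int) (time : Int),
  Dom_max_plan a b time → Pre_max_plan a b time → Spec_max_plan a b time (max_plan a b time)

-- ===== LEMMAS AND PROOFS =====

-- B's value is symmetric in the two machines.
lemma alt_comm (a b : List Int) (t : Int) : max_plan_alt b a t = max_plan_alt a b t := by
  unfold max_plan_alt
  by_cases h : (a.length : Int) ≤ t ∨ (b.length : Int) ≤ t
  · rw [if_pos (by tauto), if_pos h]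
  · rw [if_neg (by tauto), if_neg h]
    cases hga : PySem.List.pyGet? a 0 <;> cases hgb : PySem.List.pyGet? b 0 <;>
      simp [max_comm]

-- Core invariant: with enough fuel, A's recursion computes B's accumulation.
lemma go_eq (fuel : Nat) : ∀ (a b : List Int) (t : Int),
    1 ≤ t → t < (a.length : Int) → t < (b.length : Int) → t.toNat ≤ fuel →
    maxPlanGo a b t fuel = max_plan_alt a b t := by
  induction fuel with
  | zero => intro a b t h1 _ _ hf; omega
  | succ fuel ih =>
    intro a b t h1 ha hb hf
    have hguard : ¬ ((a.length : Int) ≤ t ∨ (b.length : Int) ≤ t) := by omega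
    by_cases ht1 : t = 1
    · subst ht1
      unfold maxPlanGo max_plan_alt
      rw [if_neg hguard, if_pos rfl, if_neg hguard]
      cases hga : PySem.List.pyGet? a 0 <;> cases hgb : PySem.List.pyGet? b 0 <;>
        simp
    · -- t ≥ 2
      have ht2 : 2 ≤ t := by omega
      have iha : maxPlanGo a b (t - 1) fuel = max_plan_alt a b (t - 1) :=
        ih a b (t - 1) (by omega) (by omega) (by omega) (by omega)
      have ihb : maxPlanGo b a (t - 1) fuel = max_plan_alt a b (t - 1) := by
        rw [ih b a (t - 1) (by omega) (by omega) (by omega) (by omega)]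
        exact alt_comm a b (t - 1)
      -- expose the value of max_plan_alt a b (t-1)
      have hal : 1 ≤ (a.length : Int) := by omega
      have hbl : 1 ≤ (b.length : Int) := by omega
      obtain ⟨x, as', rfl⟩ : ∃ x as', a = x :: as' := by
        cases a with
        | nil => simp at hal
        | cons x as' => exact ⟨x, as', rfl⟩
      obtain ⟨y, bs', rfl⟩ : ∃ y bs', b = y :: bs' := by
        cases b with
        | nil => simp at hbl
        | cons y bs' => exact ⟨y, bs', rfl⟩
      have hprev : max_plan_alt (x :: as') (y :: bs') (t - 1) =
          some ((PySem.List.pyRange 2 t 1).foldl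
            (fun acc i =>
              acc + max (max (PySem.List.pyGetD (x :: as') i 0) (PySem.List.pyGetD (y :: bs') i 0)) 0)
            (max x y)) := by
        unfold max_plan_alt
        rw [if_neg (by omega : ¬ (((x :: as').length : Int) ≤ t - 1 ∨ ((y :: bs').length : Int) ≤ t - 1))]
        simp
      have hgat := PySem.List.pyGet?_eq_some_getElem (x :: as') (show (0:Int) ≤ t by omega) ha
      have hgbt := PySem.List.pyGet?_eq_some_getElem (y :: bs') (show (0:Int) ≤ t by omega) hb
      unfold maxPlanGo
      rw [if_neg hguard, if_neg ht1, iha, ihb, hprev, hgat, hgbt]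
      unfold max_plan_alt
      rw [if_neg hguard]
      simp only [PySem.List.pyGet?_zero_cons]
      have hsplit : PySem.List.pyRange 2 (t + 1) 1 = PySem.List.pyRange 2 t 1 ++ [t] := by
        have := PySem.List.pyRange_one_succ_right (a := 2) (b := t) (by omega)
        simpa using this
      rw [hsplit, List.foldl_append]
      simp only [List.foldl_cons, List.foldl_nil]
      rw [PySem.List.pyGetD_eq_getElem _ 0 (by omega) ha, PySem.List.pyGetD_eq_getElem _ 0 (by omega) hb]
      congr 1
      omega

-- ===== VERDICT (by name: the statement is the Claim_ definition above) =====
theorem max_plan_spec : Claim_equal_max_plan := by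
  intro a b t _ hpre
  unfold Spec_max_plan max_plan
  by_cases hguard : (a.length : Int) ≤ t ∨ (b.length : Int) ≤ t
  · have halt : max_plan_alt a b t = none := by unfold max_plan_alt; rw [if_pos hguard]
    rw [halt]
    cases hft : t.toNat with
    | zero => rfl
    | succ fuel => unfold maxPlanGo; rw [if_pos hguard]
  · have h1 : 1 ≤ t := by
      rcases hpre with h | h | h
      · exact h
      · exact absurd (Or.inl h) hguard
      · exact absurd (Or.inr h) hguard
    exact go_eq t.toNat a b t h1 (by omega) (by omega) le_rfl
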